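-- pv_equiv track=rewrite | github.com/LarisaBothaza/LaboratorAI | L1/pb8.py | transform_b10_to_b2
-- ===== SOURCE A (Python) =====
-- def transform_b10_to_b2(x):
--     p = 1
--     y = 0
--     while x != 0:
--         r = x % 2
--         x = x // 2
--         y = y + r * p
--         p = p * 10
--     return y
-- ===== SOURCE B (Python) =====
-- def transform_b10_to_b2(x):
--     return int(bin(x)[2:])
-- ===== Notes on version B (the rewrite author's own statement) =====
-- stated objective: idiomatic
-- what changed: B obtains the binary digit string with the built-in bin() and reads it back with int(), replacing A's mod/div accumulation loop with powers of 10.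
import Mathlib
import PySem

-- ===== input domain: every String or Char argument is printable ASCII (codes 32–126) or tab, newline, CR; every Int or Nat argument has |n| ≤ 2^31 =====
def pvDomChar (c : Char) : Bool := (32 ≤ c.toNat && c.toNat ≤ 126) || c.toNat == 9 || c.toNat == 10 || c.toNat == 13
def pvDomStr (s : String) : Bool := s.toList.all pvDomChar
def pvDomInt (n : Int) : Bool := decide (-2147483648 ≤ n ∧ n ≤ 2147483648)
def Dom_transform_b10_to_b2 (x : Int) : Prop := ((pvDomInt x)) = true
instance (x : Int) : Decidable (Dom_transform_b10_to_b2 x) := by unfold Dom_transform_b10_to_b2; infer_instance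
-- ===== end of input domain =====

-- B replaces A's mod/div accumulation loop by building the binary digit string (bin) and
-- reading it back as a decimal integer (int); idiomatic, same cost.
-- Equivalence is claimed on x ≥ 0 (Pre_): on negative x, A's while loop never terminates.

-- ===== PORT A =====
-- A's while loop; the guard for x ≤ 0 terminates where Python would loop forever (outside Pre_).
def transform_b10_to_b2_loop (x p y : Int) : Int :=
  if x ≤ 0 then y
  else transform_b10_to_b2_loop (PySem.Int.floordiv x 2) (p * 10) (y + PySem.Int.mod x 2 * p)
termination_by x.toNat
decreasing_by
  rename_i h
  rw [PySem.Int.floordiv_eq_ediv_of_pos (by omega)]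
  omega

def transform_b10_to_b2 (x : Int) : Int := transform_b10_to_b2_loop x 1 0

-- ===== PORT B =====
-- bin(x)[2:] for x ≥ 0: the list of binary digits, most significant first ("0" for x = 0);
-- int(s) folds the digits with acc*10 + d.
def binDigits (n : Nat) : List Int :=
  if n = 0 then [] else binDigits (n / 2) ++ [(n % 2 : Int)]

def transform_b10_to_b2_alt (x : Int) : Int :=
  let s := if x.toNat = 0 then [(0 : Int)] else binDigits x.toNat
  s.foldl (fun acc d => acc * 10 + d) 0

-- ===== PRECONDITION & SPEC =====
-- Pre_ excludes negative x: there Python A never terminates (x // 2 never reaches 0).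
def Pre_transform_b10_to_b2 (x : Int) : Prop := 0 ≤ x
instance (x : Int) : Decidable (Pre_transform_b10_to_b2 x) := by unfold Pre_transform_b10_to_b2; infer_instance
def pvWitness_transform_b10_to_b2 : Int := 5

def Spec_transform_b10_to_b2 (x : Int) (out : Int) : Prop := out = transform_b10_to_b2_alt x
instance (x : Int) (out : Int) : Decidable (Spec_transform_b10_to_b2 x out) := by unfold Spec_transform_b10_to_b2; infer_instance

-- ===== CLAIM (what is proved, stated in full; the proofs are below) =====
def Claim_equal_transform_b10_to_b2 : Prop := ∀ (x : Int), Dom_transform_b10_to_b2 x → Pre_transform_b10_to_b2 x → Spec_transform_b10_to_b2 x (transform_b10_to_b2 x)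

-- ===== LEMMAS AND PROOFS =====

-- the value B assigns to a positive n
def binVal (n : Nat) : Int := (binDigits n).foldl (fun acc d => acc * 10 + d) 0

theorem binVal_succ (n : Nat) (hn : n ≠ 0) :
    binVal n = binVal (n / 2) * 10 + (n % 2 : Int) := by
  unfold binVal
  rw [binDigits, if_neg hn, List.foldl_append]
  simp

-- A's loop computes y + p * binVal n for nonnegative x = n
theorem loop_eq (n : Nat) (p y : Int) :
    transform_b10_to_b2_loop (n : Int) p y = y + p * binVal n := by
  induction n using Nat.strong_induction_on generalizing p y with
  | _ n ih =>
    rw [transform_b10_to_b2_loop]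
    by_cases h : n = 0
    · subst h
      simp [binVal, binDigits]
    · rw [if_neg (by omega)]
      have h2 : (0:Int) < 2 := by omega
      rw [PySem.Int.floordiv_eq_ediv_of_pos h2, PySem.Int.mod_eq_emod_of_pos h2]
      have hd : ((n : Int)) / 2 = ((n / 2 : Nat) : Int) := (Int.natCast_div n 2).symm
      have hm : ((n : Int)) % 2 = ((n % 2 : Nat) : Int) := (Int.natCast_mod n 2).symm
      rw [hd, hm, ih (n / 2) (Nat.div_lt_self (by omega) (by omega)),
          binVal_succ n h]
      push_cast
      ring

-- ===== VERDICT (by name: the statement is the Claim_ definition above) =====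
theorem transform_b10_to_b2_spec : Claim_equal_transform_b10_to_b2 := by
  intro x _ hx
  unfold Spec_transform_b10_to_b2 transform_b10_to_b2 transform_b10_to_b2_alt
  obtain ⟨n, rfl⟩ := Int.eq_ofNat_of_zero_le hx
  rw [loop_eq]
  by_cases h : n = 0
  · subst h; simp [binVal, binDigits]
  · rw [Int.toNat_natCast, if_neg h]
    unfold binVal
    ring
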